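-- pv_equiv track=rewrite | github.com/Toumic/PythonProjectGammes | PythonProjectGammes/selection.py | _selectionner_modes
-- ===== SOURCE A (Python) =====
-- from typing import Dict, List, Tuple, Any
--
-- def _selectionner_modes(lis_retours: List[Any]) -> List[int]:
--     """
--     Sélectionne les modes les plus légers selon :
--     - envergure minimale (forces)
--     - poids minimal
--     """
--
--     if not lis_retours:
--         return []
--
--     forces_list = [item[0][1] for item in lis_retours]
--     poids_list = [item[1][1] for item in lis_retours]
--
--     # Longueur des forces
--     mini_forces = [(len(f), i) for i, f in enumerate(forces_list)]
--     min_len = min(x[0] for x in mini_forces)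
--
--     # Indices des modes ayant la plus petite envergure
--     candidats = [i for l, i in mini_forces if l == min_len]
--
--     # Parmi eux, on garde ceux ayant le plus petit poids
--     min_poids = min(poids_list[i] for i in candidats)
--     res_fo = [i for i in candidats if poids_list[i] == min_poids]
--
--     return res_fo
-- ===== SOURCE B (Python) =====
-- def _selectionner_modes(lis_retours):
--     best = None
--     res = []
--     for i, item in enumerate(lis_retours):
--         k = (len(item[0][1]), item[1][1])
--         if best is None or k < best:
--             best = k
--             res = [i]
--         elif k == best:
--             res.append(i)
--     return res
-- ===== Notes on version B (the rewrite author's own statement) =====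
-- stated objective: alternative
-- what changed: Replaces A's staged whole-list passes (list of lengths, min, filter candidates, min weight via index lookups, filter again) by one online left-to-right scan that maintains the current best (length, weight) and the running list of indices achieving it, resetting on a strictly better key and appending on a tie.
import Mathlib
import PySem

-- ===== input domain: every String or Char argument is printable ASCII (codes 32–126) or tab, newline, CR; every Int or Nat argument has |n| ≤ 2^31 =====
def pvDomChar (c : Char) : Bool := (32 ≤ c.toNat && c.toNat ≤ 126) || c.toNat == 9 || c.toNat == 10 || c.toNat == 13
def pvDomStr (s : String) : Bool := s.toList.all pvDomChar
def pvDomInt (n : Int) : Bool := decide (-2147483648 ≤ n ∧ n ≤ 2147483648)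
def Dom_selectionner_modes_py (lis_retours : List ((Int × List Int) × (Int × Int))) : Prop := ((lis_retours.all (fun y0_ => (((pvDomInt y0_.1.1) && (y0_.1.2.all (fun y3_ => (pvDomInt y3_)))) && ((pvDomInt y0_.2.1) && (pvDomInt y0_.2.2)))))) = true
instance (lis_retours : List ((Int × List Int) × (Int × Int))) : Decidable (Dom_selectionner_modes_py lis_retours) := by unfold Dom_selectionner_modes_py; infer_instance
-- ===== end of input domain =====

-- B replaces A's staged whole-list passes (min length, filter, min weight via index
-- lookups, filter) by a single online scan keeping the current best (length, weight)
-- key and the running index list; objective: alternative (same asymptotic cost).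

-- ===== PORT A =====
def selectionner_modes_py (lis_retours : List ((Int × List Int) × (Int × Int))) : List Int :=
  if lis_retours = [] then []
  else
    let forces_list := lis_retours.map (fun item => item.1.2)
    let poids_list := lis_retours.map (fun item => item.2.2)
    let mini_forces : List (Int × Int) :=
      (PySem.List.enumerate forces_list).map (fun p => ((p.2.length : Int), p.1))
    match PySem.List.min? (mini_forces.map (fun x => x.1)) (fun x => x) with
    | none => []   -- unreachable: lis_retours ≠ [] so the list is nonempty
    | some min_len =>
      let candidats := (mini_forces.filter (fun p => p.1 == min_len)).map (fun p => p.2)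
      -- indices in candidats are always in range, so pyGetD's default is never used
      match PySem.List.min? (candidats.map (fun i => PySem.List.pyGetD poids_list i 0)) (fun x => x) with
      | none => []  -- unreachable: candidats is nonempty
      | some min_poids =>
        candidats.filter (fun i => PySem.List.pyGetD poids_list i 0 == min_poids)

-- ===== PORT B =====
-- key of an enumerated item: (len(item[0][1]), item[1][1])
def pvKeyB (p : Int × ((Int × List Int) × (Int × Int))) : Int × Int :=
  ((p.2.1.2.length : Int), p.2.2.2)

-- Python's strict lexicographic < on int pairs
def pvLexLt (k b : Int × Int) : Bool :=
  decide (k.1 < b.1) || (k.1 == b.1 && decide (k.2 < b.2))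

-- one iteration of B's loop body
def pvBStep (st : Option (Int × Int) × List Int)
    (p : Int × ((Int × List Int) × (Int × Int))) : Option (Int × Int) × List Int :=
  let k := pvKeyB p
  match st.1 with
  | none => (some k, [p.1])
  | some b =>
    if pvLexLt k b then (some k, [p.1])
    else if k == b then (some b, st.2 ++ [p.1])
    else st

def selectionner_modes_py_alt (lis_retours : List ((Int × List Int) × (Int × Int))) : List Int :=
  ((PySem.List.enumerate lis_retours 0).foldl pvBStep (none, [])).2

-- ===== PRECONDITION & SPEC =====
def Spec_selectionner_modes_py (lis_retours : List ((Int × List Int) × (Int × Int))) (out : List Int) : Prop := out = selectionner_modes_py_alt lis_retours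
instance (lis_retours : List ((Int × List Int) × (Int × Int))) (out : List Int) : Decidable (Spec_selectionner_modes_py lis_retours out) := by unfold Spec_selectionner_modes_py; infer_instance

-- ===== CLAIM =====
def Claim_equal_selectionner_modes_py : Prop := ∀ (lis_retours : List ((Int × List Int) × (Int × Int))), Dom_selectionner_modes_py lis_retours → Spec_selectionner_modes_py lis_retours (selectionner_modes_py lis_retours)

-- ===== LEMMAS AND PROOFS =====

-- Python's lexicographic ≤ on int pairs
def pvLexLE (a b : Int × Int) : Prop := a.1 < b.1 ∨ (a.1 = b.1 ∧ a.2 ≤ b.2)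

def pvLmin (b k : Int × Int) : Int × Int := if pvLexLt k b then k else b

def pvBest (b : Int × Int) (ps : List (Int × ((Int × List Int) × (Int × Int)))) : Int × Int :=
  ps.foldl (fun m p => pvLmin m (pvKeyB p)) b

theorem pvLmin_le_left (b k : Int × Int) : pvLexLE (pvLmin b k) b := by
  unfold pvLmin pvLexLt pvLexLE
  split_ifs with h <;> simp_all <;> omega

theorem pvLmin_le_right (b k : Int × Int) : pvLexLE (pvLmin b k) k := by
  unfold pvLmin pvLexLt pvLexLE
  split_ifs with h <;> simp_all <;> omega

theorem pvBest_le (ps : List (Int × ((Int × List Int) × (Int × Int)))) :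
    ∀ b, pvLexLE (pvBest b ps) b := by
  induction ps with
  | nil => intro b; unfold pvBest pvLexLE; simp
  | cons p ps ih =>
    intro b
    have h1 : pvBest b (p :: ps) = pvBest (pvLmin b (pvKeyB p)) ps := rfl
    have h2 := ih (pvLmin b (pvKeyB p))
    have h3 := pvLmin_le_left b (pvKeyB p)
    rw [h1]; unfold pvLexLE at *; omega

theorem pvBest_spec (ps : List (Int × ((Int × List Int) × (Int × Int)))) :
    ∀ b, pvBest b ps ∈ b :: ps.map pvKeyB ∧
      ∀ y ∈ b :: ps.map pvKeyB, pvLexLE (pvBest b ps) y := by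
  induction ps with
  | nil =>
    intro b
    refine ⟨by simp [pvBest], ?_⟩
    intro y hy; simp at hy; subst hy; unfold pvBest pvLexLE; simp
  | cons p ps ih =>
    intro b
    have h1 : pvBest b (p :: ps) = pvBest (pvLmin b (pvKeyB p)) ps := rfl
    obtain ⟨hmem, hmin⟩ := ih (pvLmin b (pvKeyB p))
    constructor
    · rw [h1]
      rcases List.mem_cons.mp hmem with h | h
      · rw [h]
        unfold pvLmin
        split_ifs <;> simp
      · exact List.mem_cons_of_mem _ (List.mem_cons_of_mem _ h)
    · intro y hy
      rw [h1]
      have hle := hmin (pvLmin b (pvKeyB p)) (by simp)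
      have hb := pvLmin_le_left b (pvKeyB p)
      have hk := pvLmin_le_right b (pvKeyB p)
      rcases List.mem_cons.mp hy with rfl | hy'
      · unfold pvLexLE at *; omega
      · rcases List.mem_cons.mp hy' with rfl | hy''
        · unfold pvLexLE at *; omega
        · exact hmin y (by simp [hy''])

theorem pvB_fold (ps : List (Int × ((Int × List Int) × (Int × Int)))) :
    ∀ b acc, ps.foldl pvBStep (some b, acc) =
      (some (pvBest b ps),
        (if pvBest b ps = b then acc else []) ++
          (ps.filter (fun p => pvKeyB p == pvBest b ps)).map (fun p => p.1)) := by
  induction ps with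
  | nil => intro b acc; simp [pvBest]
  | cons p ps ih =>
    intro b acc
    have hbest : pvBest b (p :: ps) = pvBest (pvLmin b (pvKeyB p)) ps := rfl
    have hfold : (p :: ps).foldl pvBStep (some b, acc)
        = ps.foldl pvBStep (pvBStep (some b, acc) p) := rfl
    by_cases hlt : pvLexLt (pvKeyB p) b = true
    · have hstep : pvBStep (some b, acc) p = (some (pvKeyB p), [p.1]) := by
        simp [pvBStep, hlt]
      have hL : pvLmin b (pvKeyB p) = pvKeyB p := by simp [pvLmin, hlt]
      have hrle : pvLexLE (pvBest (pvKeyB p) ps) (pvKeyB p) := pvBest_le ps (pvKeyB p)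
      have hrne : pvBest (pvKeyB p) ps ≠ b := by
        intro hcontra
        unfold pvLexLt at hlt; unfold pvLexLE at hrle
        simp at hlt
        rcases hrle with h | h <;> (rw [hcontra] at h; omega)
      rw [hfold, hstep, ih, hbest, hL, List.filter_cons, if_neg hrne]
      by_cases hrk : pvBest (pvKeyB p) ps = pvKeyB p
      · have hb : (pvKeyB p == pvBest (pvKeyB p) ps) = true := by
          simp [hrk]
        simp [hb, hrk]
      · have hb : (pvKeyB p == pvBest (pvKeyB p) ps) = false := by
          simp
          intro h; exact hrk h.symm
        simp [hb, hrk]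
    · have hL : pvLmin b (pvKeyB p) = b := by simp [pvLmin, hlt]
      by_cases heq : pvKeyB p = b
      · have hltbb : pvLexLt b b = false := by
          unfold pvLexLt; simp
        have hstep : pvBStep (some b, acc) p = (some b, acc ++ [p.1]) := by
          simp [pvBStep, heq, hltbb]
        rw [hfold, hstep, ih, hbest, hL, List.filter_cons]
        by_cases hrb : pvBest b ps = b
        · have hb : (pvKeyB p == pvBest b ps) = true := by simp [heq, hrb]
          simp [hb, hrb, heq]
        · have hb : (pvKeyB p == pvBest b ps) = false := by
            simp [heq]
            intro h; exact hrb h.symm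
          have hrb' : b ≠ pvBest b ps := Ne.symm hrb
          simp [hb, hrb, hrb', heq]
      · have hstep : pvBStep (some b, acc) p = (some b, acc) := by
          simp [pvBStep, hlt, heq]
        have hrle : pvLexLE (pvBest b ps) b := pvBest_le ps b
        have hne : pvKeyB p ≠ pvBest b ps := by
          intro h
          rw [← h] at hrle
          unfold pvLexLt at hlt; unfold pvLexLE at hrle
          simp at hlt
          apply heq
          rcases hrle with h2 | ⟨h2, h3⟩
          · omega
          · have h4 := hlt.2 h2
            exact Prod.ext_iff.mpr ⟨h2, le_antisymm h3 h4⟩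
        have hb : (pvKeyB p == pvBest b ps) = false := by
          simp [hne]
        rw [hfold, hstep, ih, hbest, hL, List.filter_cons, hb]
        simp

theorem pvEnumerate_map {α β : Type} (f : α → β) (l : List α) (s : Int) :
    PySem.List.enumerate (l.map f) s = (PySem.List.enumerate l s).map (fun p => (p.1, f p.2)) := by
  induction l generalizing s with
  | nil => simp [PySem.List.enumerate_nil]
  | cons a t ih => simp [PySem.List.enumerate_cons, ih]

theorem pvMap_snd_enumerate {α β : Type} (f : α → β) (xs : List α) (s : Int) :
    (PySem.List.enumerate xs s).map (fun p => f p.2) = xs.map f := by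
  calc (PySem.List.enumerate xs s).map (fun p => f p.2)
      = ((PySem.List.enumerate xs s).map (fun p => p.2)).map f := by rw [List.map_map]; rfl
    _ = xs.map f := by rw [PySem.List.map_snd_enumerate]

theorem pvFilter_snd_enumerate {α β : Type} (R : α → Bool) (f : α → β) (xs : List α) (s : Int) :
    ((PySem.List.enumerate xs s).filter (fun p => R p.2)).map (fun p => f p.2)
      = (xs.filter R).map f := by
  calc ((PySem.List.enumerate xs s).filter (fun p => R p.2)).map (fun p => f p.2)
      = (((PySem.List.enumerate xs s).filter (fun p => R p.2)).map (fun p => p.2)).map f := by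
        rw [List.map_map]; rfl
    _ = (((PySem.List.enumerate xs s).map (fun p => p.2)).filter R).map f := by
        rw [List.filter_map]; rfl
    _ = (xs.filter R).map f := by rw [PySem.List.map_snd_enumerate]

theorem pvLookup {α β : Type} (f : α → β) (d : β) (xs : List α) (p : Int × α)
    (hp : p ∈ PySem.List.enumerate xs 0) : PySem.List.pyGetD (xs.map f) p.1 d = f p.2 := by
  rw [PySem.List.mem_enumerate_iff] at hp
  obtain ⟨k, hk, rfl⟩ := hp
  simp only [zero_add]
  rw [PySem.List.pyGetD_natCast]
  simp [List.getD_eq_getElem?_getD, hk]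

theorem pvMain : ∀ (l : List ((Int × List Int) × (Int × Int))),
    selectionner_modes_py l = selectionner_modes_py_alt l := by
  intro l
  by_cases hl : l = []
  · subst hl; rfl
  obtain ⟨a, t, rfl⟩ := List.exists_cons_of_ne_nil hl
  set l := a :: t with hldef
  set key : ((Int × List Int) × (Int × Int)) → Int × Int :=
    fun it => ((it.1.2.length : Int), it.2.2) with hkey
  set E := PySem.List.enumerate l 0 with hE
  set flen : ((Int × List Int) × (Int × Int)) → Int := fun it => (it.1.2.length : Int) with hflen
  -- B's running best over the tail of the enumeration
  set r := pvBest (key a) (PySem.List.enumerate t 1) with hrdef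
  have hkeyB : ∀ p : Int × ((Int × List Int) × (Int × Int)), pvKeyB p = key p.2 := by
    intro p; rfl
  have hmapk : (PySem.List.enumerate t 1).map pvKeyB = t.map key := by
    calc (PySem.List.enumerate t 1).map pvKeyB
        = (PySem.List.enumerate t 1).map (fun p => key p.2) := by
          exact List.map_congr_left (fun p _ => hkeyB p)
      _ = t.map key := pvMap_snd_enumerate key t 1
  obtain ⟨hrmem', hrmin'⟩ := pvBest_spec (PySem.List.enumerate t 1) (key a)
  rw [hmapk] at hrmem' hrmin'
  have hrmem : r ∈ l.map key := by rw [hldef, List.map_cons]; exact hrmem'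
  have hrmin : ∀ y ∈ l.map key, pvLexLE r y := by
    intro y hy; rw [hldef, List.map_cons] at hy; exact hrmin' y hy
  -- mini_forces in canonical form
  have hmini : (PySem.List.enumerate (l.map (fun item => item.1.2))).map
        (fun p => ((p.2.length : Int), p.1))
      = E.map (fun p => (flen p.2, p.1)) := by
    rw [hE, pvEnumerate_map, List.map_map]; rfl
  have hL1 : (E.map (fun p => (flen p.2, p.1))).map (fun x => x.1) = l.map flen := by
    rw [List.map_map, hE]
    exact pvMap_snd_enumerate flen l 0
  -- min over lengths
  have hne1 : l.map flen ≠ [] := by simp [hldef]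
  obtain ⟨m1, hm1⟩ : ∃ m1, PySem.List.min? (l.map flen) (fun x => x) = some m1 := by
    cases hc : PySem.List.min? (l.map flen) (fun x => x) with
    | none => exact absurd ((PySem.List.min?_eq_none_iff _ _).mp hc) hne1
    | some m => exact ⟨m, rfl⟩
  have hm1mem : m1 ∈ l.map flen := PySem.List.min?_mem hm1
  have hm1min : ∀ y ∈ l.map flen, m1 ≤ y := PySem.List.min?_isMin hm1
  have hkfst : (l.map key).map (fun k => k.1) = l.map flen := by rw [List.map_map]; rfl
  have hr1 : r.1 = m1 := by
    have h1 : m1 ≤ r.1 := hm1min _ (by rw [← hkfst]; exact List.mem_map_of_mem hrmem)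
    have h2 : m1 ∈ (l.map key).map (fun k => k.1) := by rw [hkfst]; exact hm1mem
    obtain ⟨kk, hkk, hkk1⟩ := List.mem_map.mp h2
    have h3 := hrmin kk hkk
    unfold pvLexLE at h3; omega
  -- candidats and the weight list in canonical form
  have hcand : ((E.map (fun p => (flen p.2, p.1))).filter (fun p => p.1 == m1)).map
        (fun p => p.2)
      = (E.filter (fun p => flen p.2 == m1)).map (fun p => p.1) := by
    rw [List.filter_map, List.map_map]; rfl
  set CP : List Int := (l.filter (fun it => flen it == m1)).map (fun it => it.2.2) with hCP
  have hstep2 : (E.filter (fun p => flen p.2 == m1)).map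
        (fun p => PySem.List.pyGetD (l.map (fun item => item.2.2)) p.1 0)
      = (E.filter (fun p => flen p.2 == m1)).map (fun p => p.2.2.2) :=
    List.map_congr_left (fun p hp => pvLookup (fun it => it.2.2) 0 l p (List.mem_of_mem_filter hp))
  have hstep3 : (E.filter (fun p => flen p.2 == m1)).map (fun p => p.2.2.2) = CP :=
    pvFilter_snd_enumerate (fun it => flen it == m1) (fun it => it.2.2) l 0
  -- min over weights of the candidates
  have hCPne : CP ≠ [] := by
    obtain ⟨it, hit, hit1⟩ := List.mem_map.mp hm1mem
    have : it ∈ l.filter (fun it => flen it == m1) :=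
      List.mem_filter.mpr ⟨hit, by simp [hit1]⟩
    exact List.ne_nil_of_mem (List.mem_map_of_mem this)
  obtain ⟨m2, hm2⟩ : ∃ m2, PySem.List.min? CP (fun x => x) = some m2 := by
    cases hc : PySem.List.min? CP (fun x => x) with
    | none => exact absurd ((PySem.List.min?_eq_none_iff _ _).mp hc) hCPne
    | some m => exact ⟨m, rfl⟩
  have hm2mem : m2 ∈ CP := PySem.List.min?_mem hm2
  have hm2min : ∀ y ∈ CP, m2 ≤ y := PySem.List.min?_isMin hm2
  have hr2 : r.2 = m2 := by
    have h1 : m2 ≤ r.2 := by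
      obtain ⟨it0, hit0, hit0e⟩ := List.mem_map.mp hrmem
      refine hm2min _ ?_
      rw [hCP]
      have : it0 ∈ l.filter (fun it => flen it == m1) := by
        refine List.mem_filter.mpr ⟨hit0, ?_⟩
        have : (key it0).1 = m1 := by rw [hit0e]; exact hr1
        simpa [hkey, hflen] using this
      have h4 : it0.2.2 = r.2 := by rw [← hit0e]
      rw [← h4]
      exact List.mem_map_of_mem this
    have h2 : ∃ it1 ∈ l.filter (fun it => flen it == m1), it1.2.2 = m2 := by
      obtain ⟨it1, hit1, hit1e⟩ := List.mem_map.mp (hCP ▸ hm2mem)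
      exact ⟨it1, hit1, hit1e⟩
    obtain ⟨it1, hit1, hit1e⟩ := h2
    obtain ⟨hit1l, hit1p⟩ := List.mem_filter.mp hit1
    have h5 := hrmin (key it1) (List.mem_map_of_mem hit1l)
    have h6 : (key it1).1 = m1 := by simpa [hkey, hflen] using hit1p
    have h7 : (key it1).2 = m2 := hit1e
    unfold pvLexLE at h5; omega
  have hr12 : r = (m1, m2) := by
    obtain ⟨r1, r2⟩ := r
    simp only [Prod.mk.injEq]
    exact ⟨hr1, hr2⟩
  -- B's side reduced to a filter over the enumeration
  have hBside : selectionner_modes_py_alt l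
      = (E.filter (fun p => pvKeyB p == r)).map (fun p => p.1) := by
    unfold selectionner_modes_py_alt
    rw [← hE]
    have hEc : E = ((0 : Int), a) :: PySem.List.enumerate t 1 := by
      rw [hE, hldef, PySem.List.enumerate_cons]
      norm_num
    rw [hEc]
    have hstep0 : pvBStep (none, []) ((0 : Int), a) = (some (key a), [(0 : Int)]) := rfl
    rw [List.foldl_cons, hstep0, pvB_fold, ← hrdef]
    rw [List.filter_cons]
    have hk0 : pvKeyB ((0 : Int), a) = key a := rfl
    by_cases hra : r = key a
    · have hb0 : (pvKeyB ((0 : Int), a) == r) = true := by rw [hk0, hra]; simp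
      simp [hra, hk0]
    · have hne0 : pvKeyB ((0 : Int), a) ≠ r := by
        rw [hk0]; exact fun h => hra h.symm
      have hb0 : (pvKeyB ((0 : Int), a) == r) = false := by
        simp [hne0]
      simp [hb0, hra]
  -- assemble
  rw [hBside]
  unfold selectionner_modes_py
  rw [if_neg hl]
  dsimp only
  rw [hmini, hL1, hm1]
  dsimp only
  rw [hcand, List.map_map]
  rw [show ((fun i => PySem.List.pyGetD (l.map (fun item => item.2.2)) i 0) ∘ (fun p : Int × ((Int × List Int) × (Int × Int)) => p.1))
      = (fun p : Int × ((Int × List Int) × (Int × Int)) => PySem.List.pyGetD (l.map (fun item => item.2.2)) p.1 0) from rfl]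
  rw [hstep2, hstep3, hm2]
  dsimp only
  rw [List.filter_map, List.filter_filter]
  refine congrArg _ (List.filter_congr ?_)
  intro p hp
  have hlook := pvLookup (fun it => it.2.2) 0 l p hp
  simp only [Function.comp_apply, hlook, hr12, hkey, hflen, pvKeyB]
  rw [show ((((p.2.1.2.length : Int), p.2.2.2) : Int × Int) == (m1, m2))
      = (((p.2.1.2.length : Int) == m1) && (p.2.2.2 == m2)) from rfl, Bool.and_comm]

-- ===== VERDICT =====
theorem selectionner_modes_py_spec : Claim_equal_selectionner_modes_py := by
  intro l _
  exact pvMain l
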